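-- pv_equiv track=rewrite | github.com/DerDodo/AdventOfCode2015 | solutions/level24.py | get_all_possible_configuration
-- ===== SOURCE A (Python) =====
-- from typing import List, Set
--
-- def get_all_possible_configuration(presents: List[int], remaining_weight: int):
--     permutations = []
--     for i in range(len(presents)):
--         item = presents[i]
--         if item == remaining_weight:
--             permutations.append([item])
--         elif item < remaining_weight:
--             remaining_list = presents[i + 1 :]
--             for permutation in get_all_possible_configuration(remaining_list, remaining_weight - item):
--                 permutations.append([item] + permutation)
--     return permutations
-- ===== SOURCE B (Python) =====
-- def get_all_possible_configuration(presents, remaining_weight):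
--     if not presents:
--         return []
--     item, rest = presents[0], presents[1:]
--     if item == remaining_weight:
--         include = [[item]]
--     elif item < remaining_weight:
--         include = [[item] + p for p in get_all_possible_configuration(rest, remaining_weight - item)]
--     else:
--         include = []
--     return include + get_all_possible_configuration(rest, remaining_weight)
-- ===== Notes on version B (the rewrite author's own statement) =====
-- stated objective: simpler
-- what changed: Replaced the loop over all starting indices (each taking a suffix slice) by an include/exclude head recursion on the first element, with the exclude branch replacing the remaining loop iterations.
import Mathlib
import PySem

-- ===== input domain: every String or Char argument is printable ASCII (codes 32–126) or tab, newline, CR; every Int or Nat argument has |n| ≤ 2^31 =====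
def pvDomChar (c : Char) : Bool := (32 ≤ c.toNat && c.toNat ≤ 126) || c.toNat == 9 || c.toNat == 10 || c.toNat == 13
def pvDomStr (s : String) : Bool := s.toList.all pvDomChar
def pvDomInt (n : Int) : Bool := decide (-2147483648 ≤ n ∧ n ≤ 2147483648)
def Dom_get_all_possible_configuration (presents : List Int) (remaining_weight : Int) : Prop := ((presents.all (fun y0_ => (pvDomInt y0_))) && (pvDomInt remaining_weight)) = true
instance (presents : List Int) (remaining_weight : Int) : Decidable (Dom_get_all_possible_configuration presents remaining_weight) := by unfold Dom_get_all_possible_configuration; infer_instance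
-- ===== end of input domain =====

-- B replaces A's index loop with suffix slices by an include/exclude head recursion: simpler, same result.

-- ===== PORT A =====
-- A's `for i in range(len(presents))` loop with mutable `permutations`, as a tail
-- recursion on the index i carrying the accumulator; the inner `for permutation in …:
-- permutations.append([item] + permutation)` is the appended map.
def gapcA_loop (presents : List Int) (remaining_weight : Int) (i : Nat) (acc : List (List Int)) : List (List Int) :=
  if h : i < presents.length then
    let item := presents[i]
    if item = remaining_weight then
      gapcA_loop presents remaining_weight (i + 1) (acc ++ [[item]])
    else if item < remaining_weight then
      gapcA_loop presents remaining_weight (i + 1)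
        (acc ++ (gapcA_loop (presents.drop (i + 1)) (remaining_weight - item) 0 []).map (fun p => item :: p))
    else
      gapcA_loop presents remaining_weight (i + 1) acc
  else acc
termination_by (presents.length, presents.length - i)
decreasing_by
  · simp_all [Prod.lex_iff]; omega
  · simp_all [Prod.lex_iff]; omega
  · simp_all [Prod.lex_iff]; omega
  · simp_all [Prod.lex_iff]; omega

def get_all_possible_configuration (presents : List Int) (remaining_weight : Int) : List (List Int) :=
  gapcA_loop presents remaining_weight 0 []

-- ===== PORT B =====
def get_all_possible_configuration_alt (presents : List Int) (remaining_weight : Int) : List (List Int) :=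
  match presents with
  | [] => []
  | item :: rest =>
    (if item = remaining_weight then [[item]]
     else if item < remaining_weight then
       (get_all_possible_configuration_alt rest (remaining_weight - item)).map (fun p => item :: p)
     else []) ++ get_all_possible_configuration_alt rest remaining_weight

-- ===== PRECONDITION & SPEC =====
def Spec_get_all_possible_configuration (presents : List Int) (remaining_weight : Int) (out : List (List Int)) : Prop := out = get_all_possible_configuration_alt presents remaining_weight
instance (presents : List Int) (remaining_weight : Int) (out : List (List Int)) : Decidable (Spec_get_all_possible_configuration presents remaining_weight out) := by unfold Spec_get_all_possible_configuration; infer_instance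

-- ===== CLAIM (what is proved, stated in full; the proofs are below) =====
def Claim_equal_get_all_possible_configuration : Prop := ∀ (presents : List Int) (remaining_weight : Int), Dom_get_all_possible_configuration presents remaining_weight → Spec_get_all_possible_configuration presents remaining_weight (get_all_possible_configuration presents remaining_weight)

-- ===== LEMMAS AND PROOFS =====

-- Invariant of A's loop: from index i with accumulator acc, it returns acc followed
-- by B's value on the suffix presents.drop i.
theorem gapcA_loop_eq_alt (presents : List Int) (remaining_weight : Int) (i : Nat) (acc : List (List Int)) :
    gapcA_loop presents remaining_weight i acc
      = acc ++ get_all_possible_configuration_alt (presents.drop i) remaining_weight := by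
  fun_induction gapcA_loop presents remaining_weight i acc with
  | case1 p i acc hlt item ih =>
    rw [ih, List.drop_eq_getElem_cons hlt, get_all_possible_configuration_alt]
    simp [item]
  | case2 p w i acc hlt item hne hltw ihA ihB ihC =>
    simp only [List.drop_zero, List.nil_append] at ihA
    rw [ihC, ihA, List.drop_eq_getElem_cons hlt, get_all_possible_configuration_alt]
    simp [item, hne, hltw]
  | case3 p w i acc hlt item hne hnlt ih =>
    rw [ih, List.drop_eq_getElem_cons hlt, get_all_possible_configuration_alt]
    simp [item, hne, hnlt]
  | case4 p w i acc hge =>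
    rw [List.drop_eq_nil_of_le (by omega)]
    simp [get_all_possible_configuration_alt]
-- ===== VERDICT (by name: the statement is the Claim_ definition above) =====
theorem get_all_possible_configuration_spec : Claim_equal_get_all_possible_configuration := by
  intro presents remaining_weight _
  unfold Spec_get_all_possible_configuration get_all_possible_configuration
  simpa using gapcA_loop_eq_alt presents remaining_weight 0 []
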